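-- pv_equiv track=rewrite | github.com/hyukishi/amethyst-valshara | webui/server.py | write_aliases_to_blob
-- ===== SOURCE A (Python) =====
-- def write_aliases_to_blob(blob: str, aliases):
--     lines = blob.splitlines()
--     new_lines = [line for line in lines if not line.startswith('Alias')]
--     insert_at = len(new_lines)
--     for idx, line in enumerate(new_lines):
--         if line.startswith('Ignored') or line.startswith('Bamfin') or line.startswith('End'):
--             insert_at = idx
--             break
--     alias_lines = [f'Alias        {alias["name"]}~ {alias["command"]}~' for alias in aliases if alias['name'] and alias['command']]
--     rebuilt = new_lines[:insert_at] + alias_lines + new_lines[insert_at:]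
--     return '\n'.join(rebuilt) + ('\n' if blob.endswith('\n') else '')
-- ===== SOURCE B (Python) =====
-- def write_aliases_to_blob(blob: str, aliases):
--     alias_lines = [f'Alias        {alias["name"]}~ {alias["command"]}~' for alias in aliases if alias['name'] and alias['command']]
--     out = []
--     inserted = False
--     for line in blob.splitlines():
--         if line.startswith('Alias'):
--             continue
--         if not inserted and (line.startswith('Ignored') or line.startswith('Bamfin') or line.startswith('End')):
--             out.extend(alias_lines)
--             inserted = True
--         out.append(line)
--     if not inserted:
--         out.extend(alias_lines)
--     return '\n'.join(out) + ('\n' if blob.endswith('\n') else '')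
-- ===== Notes on version B (the rewrite author's own statement) =====
-- stated objective: simpler
-- what changed: Replaces A's three separate passes (filter list, enumerate-scan for insert_at, list-slice splice) with one pass over the lines that skips Alias lines and splices the alias lines in-place before the first marker line, tracked by an inserted flag.
-- outside the precondition, e.g. on write_aliases_to_blob('End\n', [{'command': 'c'}]): A raises KeyError, B raises KeyError
import Mathlib
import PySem

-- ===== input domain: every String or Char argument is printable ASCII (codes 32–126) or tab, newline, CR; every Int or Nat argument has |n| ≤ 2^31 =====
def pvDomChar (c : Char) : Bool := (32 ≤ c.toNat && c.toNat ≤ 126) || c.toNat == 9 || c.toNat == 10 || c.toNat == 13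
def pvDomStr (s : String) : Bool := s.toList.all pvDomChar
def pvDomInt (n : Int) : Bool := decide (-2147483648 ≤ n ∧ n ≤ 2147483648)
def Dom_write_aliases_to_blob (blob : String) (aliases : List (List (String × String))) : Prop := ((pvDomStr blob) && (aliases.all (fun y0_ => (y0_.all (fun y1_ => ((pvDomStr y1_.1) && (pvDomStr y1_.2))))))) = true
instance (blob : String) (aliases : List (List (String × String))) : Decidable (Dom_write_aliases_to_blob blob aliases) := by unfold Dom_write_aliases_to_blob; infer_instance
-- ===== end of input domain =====

-- B: one pass over the lines (skip Alias lines, splice the alias lines before the first marker,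
-- tracked by an inserted flag) instead of A's filter pass + index scan + slice splice; objective: simpler.

-- shared helpers: both Pythons contain this exact marker test and this exact alias-line comprehension
def pvIsMarker (l : String) : Bool :=
  PySem.Str.startswith l "Ignored" || PySem.Str.startswith l "Bamfin" || PySem.Str.startswith l "End"

-- alias['name'] / alias['command'] = first-match lookup; Pre_ guarantees the keys A evaluates exist,
-- so the getD "" default is never taken on admitted inputs
def pvAliasLines (aliases : List (List (String × String))) : List String :=
  (aliases.filter (fun a =>
      !(((a.lookup "name").getD "") == "") && !(((a.lookup "command").getD "") == ""))).map
    (fun a => "Alias        " ++ (a.lookup "name").getD "" ++ "~ " ++ (a.lookup "command").getD "" ++ "~")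

-- ===== PORT A =====
-- A's for-idx loop with break: first marker index in new_lines, default its length
def pvFindInsert : List String → Nat
  | [] => 0
  | l :: rest => if pvIsMarker l then 0 else pvFindInsert rest + 1

def write_aliases_to_blob (blob : String) (aliases : List (List (String × String))) : String :=
  let lines := PySem.Str.splitlines blob
  let new_lines := lines.filter (fun l => !PySem.Str.startswith l "Alias")
  let insert_at := pvFindInsert new_lines
  let alias_lines := pvAliasLines aliases
  -- new_lines[:insert_at] / new_lines[insert_at:] : insert_at ∈ [0, len], so take/drop are exact
  let rebuilt := new_lines.take insert_at ++ alias_lines ++ new_lines.drop insert_at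
  PySem.Str.join "\n" rebuilt ++ (if PySem.Str.endswith blob "\n" then "\n" else "")

-- ===== PORT B =====
-- B's single for-loop over blob.splitlines() with the 'inserted' flag
def pvAltLoop (aliasLines : List String) : List String → Bool → List String
  | [], inserted => if inserted then [] else aliasLines
  | l :: rest, inserted =>
    if PySem.Str.startswith l "Alias" then pvAltLoop aliasLines rest inserted
    else if !inserted && pvIsMarker l then aliasLines ++ (l :: pvAltLoop aliasLines rest true)
    else l :: pvAltLoop aliasLines rest inserted

def write_aliases_to_blob_alt (blob : String) (aliases : List (List (String × String))) : String :=
  let alias_lines := pvAliasLines aliases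
  let out := pvAltLoop alias_lines (PySem.Str.splitlines blob) false
  PySem.Str.join "\n" out ++ (if PySem.Str.endswith blob "\n" then "\n" else "")

-- ===== PRECONDITION & SPEC =====
-- Pre_ excludes exactly the inputs where A raises KeyError: an alias with no 'name' key, or with a
-- truthy (non-empty) 'name' but no 'command' key (short-circuit: a falsy name never reads 'command').
def Pre_write_aliases_to_blob (_blob : String) (aliases : List (List (String × String))) : Prop :=
  (aliases.all (fun a =>
    match a.lookup "name" with
    | none => false
    | some n => (n == "") || (a.lookup "command").isSome)) = true

instance (blob : String) (aliases : List (List (String × String))) : Decidable (Pre_write_aliases_to_blob blob aliases) := by unfold Pre_write_aliases_to_blob; infer_instance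

def pvWitness_write_aliases_to_blob : String × (List (List (String × String))) :=
  ("Begin\nEnd\n", [[("name", "g"), ("command", "ls")]])

def Spec_write_aliases_to_blob (blob : String) (aliases : List (List (String × String))) (out : String) : Prop := out = write_aliases_to_blob_alt blob aliases
instance (blob : String) (aliases : List (List (String × String))) (out : String) : Decidable (Spec_write_aliases_to_blob blob aliases out) := by unfold Spec_write_aliases_to_blob; infer_instance

-- ===== CLAIM (what is proved, stated in full; the proofs are below) =====
def Claim_equal_write_aliases_to_blob : Prop := ∀ (blob : String) (aliases : List (List (String × String))), Dom_write_aliases_to_blob blob aliases → Pre_write_aliases_to_blob blob aliases → Spec_write_aliases_to_blob blob aliases (write_aliases_to_blob blob aliases)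

-- ===== LEMMAS AND PROOFS =====

-- once inserted, B's loop is just A's Alias-filter of the remaining lines
theorem pvAltLoop_true (al ls : List String) :
    pvAltLoop al ls true = ls.filter (fun l => !PySem.Str.startswith l "Alias") := by
  induction ls with
  | nil => simp [pvAltLoop]
  | cons l rest ih =>
    by_cases h : PySem.Str.startswith l "Alias" = true <;> simp at h <;>
      simp [pvAltLoop, h, ih]

-- before insertion, B's loop equals A's take/splice/drop of the filtered lines
theorem pvAltLoop_false (al ls : List String) :
    pvAltLoop al ls false =
      (ls.filter (fun l => !PySem.Str.startswith l "Alias")).take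
          (pvFindInsert (ls.filter (fun l => !PySem.Str.startswith l "Alias"))) ++ al ++
        (ls.filter (fun l => !PySem.Str.startswith l "Alias")).drop
          (pvFindInsert (ls.filter (fun l => !PySem.Str.startswith l "Alias"))) := by
  induction ls with
  | nil => simp [pvAltLoop, pvFindInsert]
  | cons l rest ih =>
    by_cases h : PySem.Str.startswith l "Alias" = true
    · simp at h
      simpa [pvAltLoop, h, List.filter_cons] using ih
    · simp at h
      by_cases hm : pvIsMarker l = true
      · simp [pvAltLoop, h, hm, pvFindInsert, pvAltLoop_true]
      · simp [pvAltLoop, h, hm, pvFindInsert, ih]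

-- ===== VERDICT (by name: the statement is the Claim_ definition above) =====
theorem write_aliases_to_blob_spec : Claim_equal_write_aliases_to_blob := by
  intro blob aliases _ _
  unfold Spec_write_aliases_to_blob write_aliases_to_blob write_aliases_to_blob_alt
  simp [pvAltLoop_false]
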